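-- pv_equiv track=rewrite | github.com/gfelis/cropDoc | model/predictions.py | find_maximums
-- ===== SOURCE A (Python) =====
-- def find_maximums(list):
--     max1, max2, max3= 0, 0, 0
--     for i in list:
--         if i > max1:
--             max3 = max2
--             max2 = max1
--             max1 = i
--         elif i > max2:
--             max3 = max2
--             max2 = i
--         elif i > max3:
--             max3 = i
--     return max2, max3
-- ===== SOURCE B (Python) =====
-- def find_maximums(list):
--     top = sorted((x for x in list if x > 0), reverse=True) + [0, 0, 0]
--     return top[1], top[2]
-- ===== Notes on version B (the rewrite author's own statement) =====
-- stated objective: simpler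
-- what changed: Replaces the running three-maxima selection loop by sorting the positive elements in descending order and indexing the second and third entries (zero-padded), a two-line declarative version.
import Mathlib
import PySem

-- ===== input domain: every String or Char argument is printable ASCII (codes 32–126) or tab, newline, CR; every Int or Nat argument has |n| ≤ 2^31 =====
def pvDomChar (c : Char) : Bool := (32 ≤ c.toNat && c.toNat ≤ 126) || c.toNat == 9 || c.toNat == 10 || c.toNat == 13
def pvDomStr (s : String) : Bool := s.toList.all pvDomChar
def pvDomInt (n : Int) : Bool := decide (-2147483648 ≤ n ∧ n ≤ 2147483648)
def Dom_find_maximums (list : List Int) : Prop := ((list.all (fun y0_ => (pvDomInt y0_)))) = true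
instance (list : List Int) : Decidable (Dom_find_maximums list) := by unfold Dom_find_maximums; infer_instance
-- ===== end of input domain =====

-- ===== PORT A =====
-- B changes only the algorithm (sort-then-index instead of a running three-maxima loop); same return value.
-- loop body of A, one iteration of the for-loop over (max1, max2, max3)
def find_maximums_step (st : Int × Int × Int) (i : Int) : Int × Int × Int :=
  if i > st.1 then (i, st.1, st.2.1)
  else if i > st.2.1 then (st.1, i, st.2.1)
  else if i > st.2.2 then (st.1, st.2.1, i)
  else st

def find_maximums (list : List Int) : Int × Int :=
  let s := list.foldl find_maximums_step (0, 0, 0)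
  (s.2.1, s.2.2)

-- ===== PORT B =====
def find_maximums_alt (list : List Int) : Int × Int :=
  let top := PySem.List.sorted (list.filter (fun x => 0 < x)) (fun x => x) true ++ [0, 0, 0]
  -- top[1], top[2]: always in range (length ≥ 3), so plain getD is exact here
  (top.getD 1 0, top.getD 2 0)

-- ===== PRECONDITION & SPEC =====
def Spec_find_maximums (list : List Int) (out : Int × Int) : Prop := out = find_maximums_alt list
instance (list : List Int) (out : Int × Int) : Decidable (Spec_find_maximums list out) := by unfold Spec_find_maximums; infer_instance

-- ===== CLAIM (what is proved, stated in full; the proofs are below) =====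
def Claim_equal_find_maximums : Prop := ∀ (list : List Int), Dom_find_maximums list → Spec_find_maximums list (find_maximums list)

-- ===== LEMMAS AND PROOFS =====

-- the first three entries of an accumulator list, padded with 0
def pvView (acc : List Int) : Int × Int × Int := (acc.getD 0 0, acc.getD 1 0, acc.getD 2 0)

-- B-side fold step: conditional descending insertion (filter fused into the fold)
def pvIns (acc : List Int) (x : Int) : List Int :=
  if 0 < x then PySem.List.insertBy (fun a b => decide (b < a)) x acc else acc

theorem pvGetD_nonneg (acc : List Int) (hp : ∀ y ∈ acc, 0 < y) (n : Nat) :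
    0 ≤ acc.getD n 0 := by
  by_cases h : n < acc.length
  · have := hp acc[n] (acc.getElem_mem h)
    rw [List.getD_eq_getElem _ _ h]; omega
  · rw [List.getD_eq_default _ _ (by omega)]

theorem pvIns_pos (acc : List Int) (x : Int) (hp : ∀ y ∈ acc, 0 < y) :
    ∀ y ∈ pvIns acc x, 0 < y := by
  intro y hy
  unfold pvIns at hy
  split at hy
  next hx =>
    rcases (PySem.List.mem_insertBy _ _ _ _).1 hy with h | h
    · omega
    · exact hp y h
  next => exact hp y hy

theorem pvView_step (acc : List Int) (x : Int) (hp : ∀ y ∈ acc, 0 < y) :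
    pvView (pvIns acc x) = find_maximums_step (pvView acc) x := by
  by_cases hx : 0 < x
  · match acc with
    | [] =>
      simp [pvIns, pvView, PySem.List.insertBy, find_maximums_step, hx]
    | [a] =>
      have ha : 0 < a := hp a (by simp)
      by_cases h1 : a < x
      · simp [pvIns, pvView, PySem.List.insertBy, find_maximums_step, hx, h1]
      · simp [pvIns, pvView, PySem.List.insertBy, find_maximums_step, hx, h1]
    | [a, b] =>
      by_cases h1 : a < x
      · simp [pvIns, pvView, PySem.List.insertBy, find_maximums_step, hx, h1]
      · by_cases h2 : b < x
        · simp [pvIns, pvView, PySem.List.insertBy, find_maximums_step, hx, h1, h2]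
        · simp [pvIns, pvView, PySem.List.insertBy, find_maximums_step, hx, h1, h2]
    | a :: b :: c :: t =>
      by_cases h1 : a < x
      · simp [pvIns, pvView, PySem.List.insertBy, find_maximums_step, hx, h1]
      · by_cases h2 : b < x
        · simp [pvIns, pvView, PySem.List.insertBy, find_maximums_step, hx, h1, h2]
        · by_cases h3 : c < x
          · simp [pvIns, pvView, PySem.List.insertBy, find_maximums_step, hx, h1, h2, h3]
          · simp [pvIns, pvView, PySem.List.insertBy, find_maximums_step, hx, h1, h2, h3]
  · -- x ≤ 0: no branch of A fires (all three maxima are ≥ 0), and the filter drops x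
    have h0 := pvGetD_nonneg acc hp 0
    have h1 := pvGetD_nonneg acc hp 1
    have h2 := pvGetD_nonneg acc hp 2
    rw [List.getD_eq_getElem?_getD] at h0 h1 h2
    simp only [pvIns, if_neg hx, pvView, find_maximums_step, gt_iff_lt,
      List.getD_eq_getElem?_getD]
    split_ifs <;> [omega; omega; omega; rfl]

theorem pvLoop (l : List Int) : ∀ (acc : List Int), (∀ y ∈ acc, 0 < y) →
    l.foldl find_maximums_step (pvView acc) = pvView (l.foldl pvIns acc) := by
  induction l with
  | nil => intro acc _; rfl
  | cons x l ih =>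
    intro acc hp
    simp only [List.foldl_cons]
    rw [← pvView_step acc x hp, ih (pvIns acc x) (pvIns_pos acc x hp)]

theorem pvPad (t : List Int) :
    ((t ++ [0, 0, 0]).getD 1 0, (t ++ [0, 0, 0]).getD 2 0) = ((pvView t).2.1, (pvView t).2.2) := by
  match t with
  | [] => rfl
  | [a] => rfl
  | [a, b] => rfl
  | a :: b :: c :: t => rfl

-- ===== VERDICT (by name: the statement is the Claim_ definition above) =====
theorem find_maximums_spec : Claim_equal_find_maximums := by
  intro list _
  unfold Spec_find_maximums find_maximums find_maximums_alt
  rw [PySem.List.sorted_rev_eq_foldl_insertBy, List.foldl_filter]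
  have hf : (fun (x : List Int) (y : Int) =>
      if (decide (0 < y)) = true then
        PySem.List.insertBy (fun a b => decide ((fun x => x) b < (fun x => x) a)) y x
      else x) = pvIns := by
    funext acc x; simp [pvIns]
  rw [hf]
  have h1 := pvLoop list [] (by simp)
  have h2 : pvView [] = ((0:Int), (0:Int), (0:Int)) := rfl
  rw [h2] at h1
  rw [h1, pvPad]
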